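-- pv_equiv track=rewrite | github.com/duff-ae/hfpipe | src/hfcli/run_pipeline.py | parse_fills
-- ===== SOURCE A (Python) =====
-- def parse_fills(arg_list):
--     """
--     Парсер, который понимает варианты:
--       --fills 10463 10470 10471
--       --fills 10463-10470
--       --fills 10463 10470-10475 10500,10510-10512
--     """
--     if arg_list is None:
--         return None
--
--     fills = []
--
--     for token in arg_list:
--         # разрешаем "10463,10470-10475"
--         parts = token.split(",")
--         for part in parts:
--             part = part.strip()
--             if not part:
--                 continue
--             if "-" in part:
--                 start, end = part.split("-", 1)
--                 start = int(start)
--                 end = int(end)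
--                 fills.extend(range(start, end + 1))
--             else:
--                 fills.append(int(part))
--
--     if not fills:
--         return None
--
--     return sorted(set(fills))
-- ===== SOURCE B (Python) =====
-- def parse_fills(arg_list):
--     """Different algorithm: collect (lo, hi) intervals without expanding them,
--     sort by start, merge overlapping/adjacent intervals in one scan, then expand
--     the disjoint merged intervals -- no set() and no per-value deduplication."""
--     if arg_list is None:
--         return None
--
--     intervals = []
--     for part in (raw.strip() for token in arg_list for raw in token.split(",")):
--         if not part:
--             continue
--         if "-" in part:
--             lo, hi = part.split("-", 1)
--             intervals.append((int(lo), int(hi)))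
--         else:
--             v = int(part)
--             intervals.append((v, v))
--
--     intervals = [iv for iv in intervals if iv[0] <= iv[1]]
--     if not intervals:
--         return None
--
--     intervals.sort(key=lambda iv: iv[0])
--     out = []
--     cur_lo, cur_hi = intervals[0]
--     for lo, hi in intervals[1:]:
--         if lo <= cur_hi + 1:
--             if hi > cur_hi:
--                 cur_hi = hi
--         else:
--             out.extend(range(cur_lo, cur_hi + 1))
--             cur_lo, cur_hi = lo, hi
--     out.extend(range(cur_lo, cur_hi + 1))
--     return out
-- ===== Notes on version B (the rewrite author's own statement) =====
-- stated objective: alternative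
-- what changed: B never builds the multiset of expanded values: it collects (lo,hi) interval pairs, drops empty ones, sorts intervals by start, merges overlapping/adjacent intervals in one scan, and expands only the disjoint merged intervals, so no set() and no per-value deduplication or value-level sort is performed.
import Mathlib
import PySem

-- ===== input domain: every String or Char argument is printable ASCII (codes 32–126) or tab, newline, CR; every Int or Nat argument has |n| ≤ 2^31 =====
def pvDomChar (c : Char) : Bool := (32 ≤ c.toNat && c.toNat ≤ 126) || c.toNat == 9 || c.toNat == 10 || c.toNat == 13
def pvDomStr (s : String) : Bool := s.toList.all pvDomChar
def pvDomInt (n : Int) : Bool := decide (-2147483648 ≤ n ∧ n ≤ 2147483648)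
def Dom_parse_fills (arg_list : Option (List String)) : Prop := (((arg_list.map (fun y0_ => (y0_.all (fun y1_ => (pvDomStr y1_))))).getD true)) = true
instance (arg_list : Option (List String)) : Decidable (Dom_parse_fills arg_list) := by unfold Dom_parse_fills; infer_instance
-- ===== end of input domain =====

-- B uses a different algorithm: it collects (lo,hi) interval pairs instead of expanded
-- values, sorts and merges the intervals, and expands only the merged disjoint intervals.

-- ===== PORT A =====
-- token.split(",") — sep is the nonempty ",", so Str.split? always returns some (exact)
def splitComma (token : String) : List String := (PySem.Str.split? token ",").getD []
-- body of A's inner loop, acting on one raw comma-part (strips, skips empties, expands)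
def stepA (acc : Option (List Int)) (rawPart : String) : Option (List Int) :=
  acc.bind (fun fills =>
    let part := PySem.Str.strip rawPart
    if PySem.Str.len part == 0 then some fills
    else if PySem.Str.isIn "-" part then
      match PySem.Str.splitMax? part "-" 1 with
      | some [s, e] =>
          (PySem.Int.ofStr? s).bind (fun start =>
            (PySem.Int.ofStr? e).map (fun stop =>
              fills ++ PySem.List.pyRange start (stop + 1) 1))
      | _ => none   -- unreachable: split('-',1) on a string containing '-' yields exactly 2 pieces
    else (PySem.Int.ofStr? part).map (fun n => fills ++ [n]))

def parse_fills (arg_list : Option (List String)) : Option (List Int) :=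
  match arg_list with
  | none => none
  | some tokens =>
    let fills? := tokens.foldl
      (fun acc token => (splitComma token).foldl stepA acc)
      (some ([] : List Int))
    match fills? with
    | none => none   -- a ValueError path; excluded by Pre_
    | some fills =>
      if fills.isEmpty then none
      else some (PySem.List.sorted (PySem.Set.ofList fills) (fun x => x) false)

-- ===== PORT B =====
-- body of B's interval-collecting loop, acting on one already-stripped comma-part
def stepB (acc : Option (List (Int × Int))) (part : String) : Option (List (Int × Int)) :=
  acc.bind (fun ivs =>
    if PySem.Str.len part == 0 then some ivs
    else if PySem.Str.isIn "-" part then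
      match PySem.Str.splitMax? part "-" 1 with
      | some [s, e] =>
          (PySem.Int.ofStr? s).bind (fun lo =>
            (PySem.Int.ofStr? e).map (fun hi => ivs ++ [(lo, hi)]))
      | _ => none
    else (PySem.Int.ofStr? part).map (fun v => ivs ++ [(v, v)]))

-- body of B's merge loop: state (out, cur_lo, cur_hi), next interval (lo, hi)
def mergeStep (st : List Int × Int × Int) (iv : Int × Int) : List Int × Int × Int :=
  if iv.1 ≤ st.2.2 + 1 then
    (st.1, st.2.1, if st.2.2 < iv.2 then iv.2 else st.2.2)
  else
    (st.1 ++ PySem.List.pyRange st.2.1 (st.2.2 + 1) 1, iv.1, iv.2)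

def parse_fills_alt (arg_list : Option (List String)) : Option (List Int) :=
  match arg_list with
  | none => none
  | some tokens =>
    let parts := (tokens.flatMap splitComma).map PySem.Str.strip
    match parts.foldl stepB (some ([] : List (Int × Int))) with
    | none => none   -- a ValueError path; excluded by Pre_
    | some ivs0 =>
      let ivs := ivs0.filter (fun iv => decide (iv.1 ≤ iv.2))
      -- Source B checks 'if not intervals' before sorting; sorting preserves emptiness
      match PySem.List.sorted ivs (fun iv => iv.1) false with
      | [] => none
      | iv0 :: rest =>
        let st := rest.foldl mergeStep (([] : List Int), iv0.1, iv0.2)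
        some (st.1 ++ PySem.List.pyRange st.2.1 (st.2.2 + 1) 1)

-- ===== PRECONDITION & SPEC =====
-- true iff Python's int() succeeds on every piece this comma-part makes A parse
def partOk (rawPart : String) : Bool :=
  let part := PySem.Str.strip rawPart
  if PySem.Str.len part == 0 then true
  else if PySem.Str.isIn "-" part then
    match PySem.Str.splitMax? part "-" 1 with
    | some [s, e] => (PySem.Int.ofStr? s).isSome && (PySem.Int.ofStr? e).isSome
    | _ => false
  else (PySem.Int.ofStr? part).isSome

-- Pre_ excludes exactly the inputs on which A raises ValueError (a comma-part that is neither
-- blank, an int literal, nor splits at its first '-' into two int literals).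
def Pre_parse_fills (arg_list : Option (List String)) : Prop :=
  ((arg_list.getD []).all (fun token => (splitComma token).all partOk)) = true
instance (arg_list : Option (List String)) : Decidable (Pre_parse_fills arg_list) := by
  unfold Pre_parse_fills; infer_instance

def pvWitness_parse_fills : Option (List String) := some ["1-3", "5, 7"]

def Spec_parse_fills (arg_list : Option (List String)) (out : Option (List Int)) : Prop :=
  out = parse_fills_alt arg_list
instance (arg_list : Option (List String)) (out : Option (List Int)) :
    Decidable (Spec_parse_fills arg_list out) := by unfold Spec_parse_fills; infer_instance

-- ===== CLAIM (what is proved, stated in full; the proofs are below) =====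
def Claim_equal_parse_fills : Prop :=
  ∀ (arg_list : Option (List String)), Dom_parse_fills arg_list →
    Pre_parse_fills arg_list → Spec_parse_fills arg_list (parse_fills arg_list)

-- ===== LEMMAS AND PROOFS =====

-- the values an interval pair stands for
def expandIv (iv : Int × Int) : List Int := PySem.List.pyRange iv.1 (iv.2 + 1) 1

-- A's nested token/part loop is the flat loop over all comma-parts
theorem foldA_flatten (tokens : List String) (a0 : Option (List Int)) :
    tokens.foldl (fun acc token => (splitComma token).foldl stepA acc) a0
      = (tokens.flatMap splitComma).foldl stepA a0 := by
  induction tokens generalizing a0 with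
  | nil => rfl
  | cons t ts ih => simp only [List.foldl_cons, List.flatMap_cons, List.foldl_append, ih]

-- parsing invariant: A's fills list is the concatenated expansion of B's interval list
theorem parse_rel (ps : List String) (hok : ∀ p ∈ ps, partOk p = true)
    (fills : List Int) (ivs : List (Int × Int)) (h : fills = ivs.flatMap expandIv) :
    ∃ ivs', (ps.map PySem.Str.strip).foldl stepB (some ivs) = some ivs'
      ∧ ps.foldl stepA (some fills) = some (ivs'.flatMap expandIv) := by
  induction ps generalizing fills ivs with
  | nil => exact ⟨ivs, rfl, by simp [h]⟩
  | cons p ps ih =>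
    have hp : partOk p = true := hok p (List.mem_cons_self ..)
    have hok' : ∀ q ∈ ps, partOk q = true := fun q hq => hok q (List.mem_cons_of_mem _ hq)
    simp only [partOk] at hp
    by_cases h0 : (PySem.Str.len (PySem.Str.strip p) == 0) = true
    · have hA : stepA (some fills) p = some fills := by
        simp only [stepA, Option.bind_some]; rw [if_pos h0]
      have hB : stepB (some ivs) (PySem.Str.strip p) = some ivs := by
        simp only [stepB, Option.bind_some]; rw [if_pos h0]
      obtain ⟨ivs', e1, e2⟩ := ih hok' fills ivs h
      exact ⟨ivs', by rw [List.map_cons, List.foldl_cons, hB]; exact e1,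
        by rw [List.foldl_cons, hA]; exact e2⟩
    · rw [if_neg h0] at hp
      by_cases hdash : PySem.Str.isIn "-" (PySem.Str.strip p) = true
      · rw [if_pos hdash] at hp
        cases hsp : PySem.Str.splitMax? (PySem.Str.strip p) "-" 1 with
        | none => rw [hsp] at hp; simp at hp
        | some l =>
          rw [hsp] at hp
          rcases l with _ | ⟨a, _ | ⟨b, _ | ⟨c, t⟩⟩⟩ <;> [skip; skip; skip; simp at hp]
          · simp at hp
          · simp at hp
          simp only [Bool.and_eq_true, Option.isSome_iff_exists] at hp
          obtain ⟨⟨va, ha⟩, vb, hb⟩ := hp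
          have hA : stepA (some fills) p
              = some (fills ++ PySem.List.pyRange va (vb + 1) 1) := by
            simp only [stepA, Option.bind_some]
            rw [if_neg h0, if_pos hdash, hsp]
            simp only [ha, hb, Option.bind_some, Option.map_some]
          have hB : stepB (some ivs) (PySem.Str.strip p) = some (ivs ++ [(va, vb)]) := by
            simp only [stepB, Option.bind_some]
            rw [if_neg h0, if_pos hdash, hsp]
            simp only [ha, hb, Option.bind_some, Option.map_some]
          have h' : fills ++ PySem.List.pyRange va (vb + 1) 1
              = (ivs ++ [(va, vb)]).flatMap expandIv := by
            rw [h, List.flatMap_append]; simp [expandIv]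
          obtain ⟨ivs', e1, e2⟩ := ih hok' _ _ h'
          exact ⟨ivs', by rw [List.map_cons, List.foldl_cons, hB]; exact e1,
            by rw [List.foldl_cons, hA]; exact e2⟩
      · rw [if_neg hdash] at hp
        rw [Option.isSome_iff_exists] at hp
        obtain ⟨v, hv⟩ := hp
        have hA : stepA (some fills) p = some (fills ++ [v]) := by
          simp only [stepA, Option.bind_some]
          rw [if_neg h0, if_neg hdash, hv]; rfl
        have hB : stepB (some ivs) (PySem.Str.strip p) = some (ivs ++ [(v, v)]) := by
          simp only [stepB, Option.bind_some]
          rw [if_neg h0, if_neg hdash, hv]; rfl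
        have h' : fills ++ [v] = (ivs ++ [(v, v)]).flatMap expandIv := by
          rw [h, List.flatMap_append]
          simp only [List.flatMap_cons, List.flatMap_nil, List.append_nil, expandIv]
          rw [PySem.List.pyRange_one_singleton]
        obtain ⟨ivs', e1, e2⟩ := ih hok' _ _ h'
        exact ⟨ivs', by rw [List.map_cons, List.foldl_cons, hB]; exact e1,
          by rw [List.foldl_cons, hA]; exact e2⟩

-- dropping empty intervals does not change the expanded values
theorem expand_filter (ivs : List (Int × Int)) :
    (ivs.filter (fun iv => decide (iv.1 ≤ iv.2))).flatMap expandIv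
      = ivs.flatMap expandIv := by
  induction ivs with
  | nil => rfl
  | cons iv ivs ih =>
    rw [List.flatMap_cons, List.filter_cons]
    by_cases hle : iv.1 ≤ iv.2
    · simp only [hle, decide_true, if_true, List.flatMap_cons, ih]
    · have hnil : expandIv iv = [] := PySem.List.pyRange_one_eq_nil (by omega)
      simp [hle, hnil, ih]

-- expansion of a list of nonempty intervals is empty iff the list is
theorem expand_ne_nil (ivs : List (Int × Int)) (hne : ∀ iv ∈ ivs, iv.1 ≤ iv.2)
    (h : ivs ≠ []) : ivs.flatMap expandIv ≠ [] := by
  cases ivs with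
  | nil => exact absurd rfl h
  | cons iv ivs =>
    have h1 : iv.1 ∈ expandIv iv := by
      rw [expandIv, PySem.List.mem_pyRange_one]
      have := hne iv (List.mem_cons_self ..)
      omega
    intro hcon
    rw [List.flatMap_cons] at hcon
    have := List.append_eq_nil_iff.mp hcon
    rw [this.1] at h1
    exact absurd h1 (List.not_mem_nil)

-- membership of the expansion
theorem mem_expand (ivs : List (Int × Int)) (x : Int) :
    x ∈ ivs.flatMap expandIv ↔ ∃ iv ∈ ivs, iv.1 ≤ x ∧ x ≤ iv.2 := by
  rw [List.mem_flatMap]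
  constructor
  · rintro ⟨iv, hm, hx⟩
    rw [expandIv, PySem.List.mem_pyRange_one] at hx
    exact ⟨iv, hm, by omega⟩
  · rintro ⟨iv, hm, hx⟩
    exact ⟨iv, hm, by rw [expandIv, PySem.List.mem_pyRange_one]; omega⟩

-- merge-loop invariant: the final flushed list is strictly increasing and covers
-- exactly out ∪ [cl,ch] ∪ the remaining intervals
theorem merge_inv (rest : List (Int × Int)) (out : List Int) (cl ch : Int)
    (hlo : ∀ iv ∈ rest, cl ≤ iv.1)
    (hsrt : rest.Pairwise (fun a b => a.1 ≤ b.1))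
    (hne : ∀ iv ∈ rest, iv.1 ≤ iv.2)
    (hcl : cl ≤ ch)
    (hout : ∀ x ∈ out, x < cl)
    (houtp : out.Pairwise (· < ·)) :
    ((rest.foldl mergeStep (out, cl, ch)).1
        ++ PySem.List.pyRange (rest.foldl mergeStep (out, cl, ch)).2.1
            ((rest.foldl mergeStep (out, cl, ch)).2.2 + 1) 1).Pairwise (· < ·)
    ∧ ∀ x, (x ∈ (rest.foldl mergeStep (out, cl, ch)).1
        ++ PySem.List.pyRange (rest.foldl mergeStep (out, cl, ch)).2.1
            ((rest.foldl mergeStep (out, cl, ch)).2.2 + 1) 1)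
      ↔ (x ∈ out ∨ (cl ≤ x ∧ x ≤ ch) ∨ ∃ iv ∈ rest, iv.1 ≤ x ∧ x ≤ iv.2) := by
  induction rest generalizing out cl ch with
  | nil =>
    simp only [List.foldl_nil]
    constructor
    · rw [List.pairwise_append]
      refine ⟨houtp, PySem.List.pairwise_lt_pyRange_one _ _, ?_⟩
      intro a ha b hb
      rw [PySem.List.mem_pyRange_one] at hb
      have := hout a ha
      omega
    · intro x
      rw [List.mem_append, PySem.List.mem_pyRange_one]
      constructor
      · rintro (h | h)
        · exact Or.inl h
        · exact Or.inr (Or.inl (by omega))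
      · rintro (h | h | ⟨iv, hm, _⟩)
        · exact Or.inl h
        · exact Or.inr (by omega)
        · exact absurd hm (List.not_mem_nil)
  | cons iv rest ih =>
    rw [List.pairwise_cons] at hsrt
    have hiv1 : cl ≤ iv.1 := hlo iv (List.mem_cons_self ..)
    have hiv2 : iv.1 ≤ iv.2 := hne iv (List.mem_cons_self ..)
    rw [List.foldl_cons]
    by_cases hmerge : iv.1 ≤ ch + 1
    · -- merge: state becomes (out, cl, max ch iv.2)
      have hst : mergeStep (out, cl, ch) iv
          = (out, cl, if ch < iv.2 then iv.2 else ch) := by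
        simp only [mergeStep, if_pos hmerge]
      rw [hst]
      set ch' := if ch < iv.2 then iv.2 else ch with hch'
      have hcc' : cl ≤ ch' := by rw [hch']; split_ifs <;> omega
      obtain ⟨hp, hm⟩ := ih out cl ch'
        (fun j hj => le_trans hiv1 (hsrt.1 j hj))
        hsrt.2 (fun j hj => hne j (List.mem_cons_of_mem _ hj)) hcc' hout houtp
      refine ⟨hp, fun x => ?_⟩
      rw [hm x]
      have hiff : (cl ≤ x ∧ x ≤ ch') ↔ ((cl ≤ x ∧ x ≤ ch) ∨ (iv.1 ≤ x ∧ x ≤ iv.2)) := by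
        rw [hch']; split_ifs <;> omega
      constructor
      · rintro (h | h | h)
        · exact Or.inl h
        · rcases hiff.mp h with h' | h'
          · exact Or.inr (Or.inl h')
          · exact Or.inr (Or.inr ⟨iv, List.mem_cons_self .., h'⟩)
        · obtain ⟨j, hj, hxj⟩ := h
          exact Or.inr (Or.inr ⟨j, List.mem_cons_of_mem _ hj, hxj⟩)
      · rintro (h | h | ⟨j, hj, hxj⟩)
        · exact Or.inl h
        · exact Or.inr (Or.inl (hiff.mpr (Or.inl h)))
        · rcases List.mem_cons.mp hj with rfl | hj'
          · exact Or.inr (Or.inl (hiff.mpr (Or.inr hxj)))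
          · exact Or.inr (Or.inr ⟨j, hj', hxj⟩)
    · -- flush: state becomes (out ++ [cl..ch], iv.1, iv.2)
      have hst : mergeStep (out, cl, ch) iv
          = (out ++ PySem.List.pyRange cl (ch + 1) 1, iv.1, iv.2) := by
        simp only [mergeStep, if_neg hmerge]
      rw [hst]
      have hout' : ∀ x ∈ out ++ PySem.List.pyRange cl (ch + 1) 1, x < iv.1 := by
        intro x hx
        rcases List.mem_append.mp hx with hx | hx
        · have := hout x hx; omega
        · rw [PySem.List.mem_pyRange_one] at hx; omega
      have houtp' : (out ++ PySem.List.pyRange cl (ch + 1) 1).Pairwise (· < ·) := by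
        rw [List.pairwise_append]
        refine ⟨houtp, PySem.List.pairwise_lt_pyRange_one _ _, ?_⟩
        intro a ha b hb
        rw [PySem.List.mem_pyRange_one] at hb
        have := hout a ha
        omega
      obtain ⟨hp, hm⟩ := ih (out ++ PySem.List.pyRange cl (ch + 1) 1) iv.1 iv.2
        (fun j hj => hsrt.1 j hj) hsrt.2
        (fun j hj => hne j (List.mem_cons_of_mem _ hj)) hiv2 hout' houtp'
      refine ⟨hp, fun x => ?_⟩
      rw [hm x]
      constructor
      · rintro (h | h | h)
        · rcases List.mem_append.mp h with h' | h'
          · exact Or.inl h'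
          · rw [PySem.List.mem_pyRange_one] at h'
            exact Or.inr (Or.inl (by omega))
        · exact Or.inr (Or.inr ⟨iv, List.mem_cons_self .., h⟩)
        · obtain ⟨j, hj, hxj⟩ := h
          exact Or.inr (Or.inr ⟨j, List.mem_cons_of_mem _ hj, hxj⟩)
      · rintro (h | h | ⟨j, hj, hxj⟩)
        · exact Or.inl (List.mem_append.mpr (Or.inl h))
        · exact Or.inl (List.mem_append.mpr (Or.inr (by
            rw [PySem.List.mem_pyRange_one]; omega)))
        · rcases List.mem_cons.mp hj with rfl | hj'
          · exact Or.inr (Or.inl hxj)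
          · exact Or.inr (Or.inr ⟨j, hj', hxj⟩)

-- ===== VERDICT (by name: the statement is the Claim_ definition above) =====
theorem parse_fills_spec : Claim_equal_parse_fills := by
  intro arg_list _hdom hpre
  unfold Spec_parse_fills
  cases arg_list with
  | none => rfl
  | some tokens =>
    have hok : ∀ p ∈ tokens.flatMap splitComma, partOk p = true := by
      intro p hpmem
      rw [List.mem_flatMap] at hpmem
      obtain ⟨tk, ht, hpt⟩ := hpmem
      unfold Pre_parse_fills at hpre
      simp only [Option.getD_some, List.all_eq_true] at hpre
      exact hpre tk ht p hpt
    obtain ⟨ivs0, hB, hA⟩ := parse_rel (tokens.flatMap splitComma) hok [] [] rfl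
    set fills := ivs0.flatMap expandIv with hfills
    set ivsF := ivs0.filter (fun iv => decide (iv.1 ≤ iv.2)) with hivsF
    have hexp : ivsF.flatMap expandIv = fills := expand_filter ivs0
    have hneF : ∀ iv ∈ ivsF, iv.1 ≤ iv.2 := by
      intro iv hiv
      have := (List.mem_filter.mp hiv).2
      exact of_decide_eq_true this
    unfold parse_fills parse_fills_alt
    simp only [foldA_flatten, hA, hB]
    cases hsrtd : PySem.List.sorted ivsF (fun iv => iv.1) false with
    | nil =>
      have hF : ivsF = [] := (PySem.List.sorted_eq_nil_iff _ _ _).mp hsrtd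
      have : fills = [] := by rw [← hexp, hF]; rfl
      rw [this]
      rfl
    | cons iv0 rest =>
      have hperm : (iv0 :: rest).Perm ivsF := by rw [← hsrtd]; exact PySem.List.sorted_perm ..
      have hmemS : ∀ iv, iv ∈ iv0 :: rest ↔ iv ∈ ivsF := fun iv => hperm.mem_iff
      have hneS : ∀ iv ∈ iv0 :: rest, iv.1 ≤ iv.2 := fun iv h => hneF iv ((hmemS iv).mp h)
      have hpw : (iv0 :: rest).Pairwise (fun a b => a.1 ≤ b.1) := by
        rw [← hsrtd]; exact PySem.List.sorted_pairwise ..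
      rw [List.pairwise_cons] at hpw
      have hFne : ivsF ≠ [] := by
        intro hcon
        rw [hcon, (PySem.List.sorted_eq_nil_iff _ _ _).mpr rfl] at hsrtd
        exact List.cons_ne_nil _ _ hsrtd.symm
      have hfill_ne : fills ≠ [] := by
        rw [← hexp]; exact expand_ne_nil ivsF hneF hFne
      have hfe : fills.isEmpty = false := by
        cases hfc : fills with
        | nil => exact absurd hfc hfill_ne
        | cons a l => rfl
      rw [hfe]
      simp only [Bool.false_eq_true, if_false]
      obtain ⟨hpL, hmL⟩ := merge_inv rest [] iv0.1 iv0.2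
        hpw.1 hpw.2 (fun j hj => hneS j (List.mem_cons_of_mem _ hj))
        (hneS iv0 (List.mem_cons_self ..))
        (fun x hx => absurd hx (List.not_mem_nil))
        List.Pairwise.nil
      set L := (rest.foldl mergeStep ([], iv0.1, iv0.2)).1
          ++ PySem.List.pyRange (rest.foldl mergeStep ([], iv0.1, iv0.2)).2.1
              ((rest.foldl mergeStep ([], iv0.1, iv0.2)).2.2 + 1) 1 with hL
      have hmemL : ∀ x, x ∈ L ↔ x ∈ fills := by
        intro x
        rw [hmL x, ← hexp, mem_expand]
        constructor
        · rintro (h | h | ⟨j, hj, hxj⟩)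
          · exact absurd h (List.not_mem_nil)
          · exact ⟨iv0, (hmemS iv0).mp (List.mem_cons_self ..), h⟩
          · exact ⟨j, (hmemS j).mp (List.mem_cons_of_mem _ hj), hxj⟩
        · rintro ⟨j, hj, hxj⟩
          rcases List.mem_cons.mp ((hmemS j).mpr hj) with rfl | hj'
          · exact Or.inr (Or.inl hxj)
          · exact Or.inr (Or.inr ⟨j, hj', hxj⟩)
      have hndL : L.Nodup := hpL.imp (fun h => ne_of_lt h)
      have hpermL : L.Perm (PySem.Set.ofList fills) := by
        rw [List.perm_ext_iff_of_nodup hndL (PySem.Set.nodup_ofList _)]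
        intro x
        rw [PySem.Set.mem_ofList]
        exact hmemL x
      rw [PySem.List.sorted_eq_of_perm_of_pairwise_lt _ L (fun x => x) hpermL hpL]
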